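-- pv_equiv track=rewrite | github.com/stefantaubert/pinyin-to-ipa | src/pinyin_to_ipa/ipa2symb.py | get_all_next_consecutive_merge_symbols
-- ===== SOURCE A (Python) =====
-- from typing import Optional, Set, Tuple
--
-- def get_all_next_consecutive_merge_symbols(symbols: Tuple[str, ...], merge_symbols: Set[str]) -> Tuple[str, int]:
--   assert len(symbols) > 0
--   merge_symbol_concat = ""
--   index = None
--   for index, symbol in enumerate(symbols):
--     if symbol in merge_symbols:
--       merge_symbol_concat += symbol
--     else:
--       return merge_symbol_concat, index
--   assert index is not None
--   return merge_symbol_concat, index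
-- ===== SOURCE B (Python) =====
-- def get_all_next_consecutive_merge_symbols(symbols, merge_symbols):
--   assert len(symbols) > 0
--   boundary = next((i for i, s in enumerate(symbols) if s not in merge_symbols), None)
--   if boundary is not None:
--     return "".join(symbols[:boundary]), boundary
--   return "".join(symbols), len(symbols) - 1
-- ===== Notes on version B (the rewrite author's own statement) =====
-- stated objective: simpler
-- what changed: B first finds the boundary index of the first non-merge symbol (or None) and then builds the result by joining a prefix slice, instead of accumulating the concatenation inside the loop with an early return.
import Mathlib
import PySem

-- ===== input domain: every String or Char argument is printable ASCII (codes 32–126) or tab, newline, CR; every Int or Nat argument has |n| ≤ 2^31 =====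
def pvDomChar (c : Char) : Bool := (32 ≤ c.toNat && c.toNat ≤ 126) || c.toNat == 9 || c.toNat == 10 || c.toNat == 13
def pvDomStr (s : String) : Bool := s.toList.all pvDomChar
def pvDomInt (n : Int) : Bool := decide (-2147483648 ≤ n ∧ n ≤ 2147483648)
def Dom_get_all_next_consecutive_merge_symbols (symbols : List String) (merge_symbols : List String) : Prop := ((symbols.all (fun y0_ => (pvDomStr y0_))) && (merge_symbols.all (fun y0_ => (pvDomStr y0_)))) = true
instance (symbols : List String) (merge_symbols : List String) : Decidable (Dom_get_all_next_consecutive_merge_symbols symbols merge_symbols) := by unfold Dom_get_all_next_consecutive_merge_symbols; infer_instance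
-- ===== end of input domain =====

-- ===== PORT A =====
-- B changes the decomposition: boundary found first, result joined from a prefix ("simpler").
-- A: accumulate the concatenation while scanning; on a non-merge symbol return early with
-- the current index; if the loop finishes, return with the last index (len-1).
def pvGoA (merge_symbols : List String) : List String → Int → String → String × Int
  | [], i, acc => (acc, i - 1)
  | s :: rest, i, acc =>
      if s ∈ merge_symbols then pvGoA merge_symbols rest (i + 1) (acc ++ s)
      else (acc, i)

def get_all_next_consecutive_merge_symbols (symbols : List String) (merge_symbols : List String) : String × Int :=
  pvGoA merge_symbols symbols 0 ""

-- ===== PORT B =====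
def get_all_next_consecutive_merge_symbols_alt (symbols : List String) (merge_symbols : List String) : String × Int :=
  match symbols.findIdx? (fun s => decide (s ∉ merge_symbols)) with
  | some i => (String.join (symbols.take i), (i : Int))
  | none => (String.join symbols, (symbols.length : Int) - 1)

-- ===== PRECONDITION & SPEC =====
-- A (and B) assert len(symbols) > 0 and raise AssertionError on the empty list; Pre_ excludes it.
def Pre_get_all_next_consecutive_merge_symbols (symbols : List String) (_merge_symbols : List String) : Prop := symbols ≠ []
instance (symbols : List String) (merge_symbols : List String) : Decidable (Pre_get_all_next_consecutive_merge_symbols symbols merge_symbols) := by unfold Pre_get_all_next_consecutive_merge_symbols; infer_instance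
def pvWitness_get_all_next_consecutive_merge_symbols : List String × List String := (["-", "a"], ["-"])
def Spec_get_all_next_consecutive_merge_symbols (symbols : List String) (merge_symbols : List String) (out : String × Int) : Prop := out = get_all_next_consecutive_merge_symbols_alt symbols merge_symbols
instance (symbols : List String) (merge_symbols : List String) (out : String × Int) : Decidable (Spec_get_all_next_consecutive_merge_symbols symbols merge_symbols out) := by unfold Spec_get_all_next_consecutive_merge_symbols; infer_instance

-- ===== CLAIM =====
def Claim_equal_get_all_next_consecutive_merge_symbols : Prop := ∀ (symbols : List String) (merge_symbols : List String), Dom_get_all_next_consecutive_merge_symbols symbols merge_symbols → Pre_get_all_next_consecutive_merge_symbols symbols merge_symbols → Spec_get_all_next_consecutive_merge_symbols symbols merge_symbols (get_all_next_consecutive_merge_symbols symbols merge_symbols)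

-- ===== LEMMAS AND PROOFS =====
lemma pvFoldlAppend (l : List String) (a : String) :
    a ++ List.foldl (fun r s => r ++ s) "" l = List.foldl (fun r s => r ++ s) a l := by
  induction l generalizing a with
  | nil => simp
  | cons x l ih =>
      simp only [List.foldl_cons, String.empty_append]
      rw [← ih x, ← ih (a ++ x), String.append_assoc]

lemma pvGoA_spec (ms : List String) (xs : List String) (i : Int) (acc : String) :
    pvGoA ms xs i acc =
      match xs.findIdx? (fun s => decide (s ∉ ms)) with
      | some j => (acc ++ String.join (xs.take j), i + (j : Int))
      | none => (acc ++ String.join xs, i + (xs.length : Int) - 1) := by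
  induction xs generalizing i acc with
  | nil => simp [pvGoA, String.join]
  | cons s rest ih =>
      by_cases hs : s ∈ ms
      · cases h : rest.findIdx? (fun s => decide (s ∉ ms)) with
        | some j =>
            simp only [decide_not] at h
            simp [pvGoA, hs, ih, List.findIdx?_cons, h, String.join, String.append_assoc]
            exact ⟨pvFoldlAppend _ _, by omega⟩
        | none =>
            simp only [decide_not] at h
            simp [pvGoA, hs, ih, List.findIdx?_cons, h, String.join, String.append_assoc]
            exact ⟨pvFoldlAppend _ _, by omega⟩
      · simp [pvGoA, List.findIdx?_cons, hs, String.join]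

-- ===== VERDICT =====
theorem get_all_next_consecutive_merge_symbols_spec : Claim_equal_get_all_next_consecutive_merge_symbols := by
  intro symbols merge_symbols _ _
  unfold Spec_get_all_next_consecutive_merge_symbols get_all_next_consecutive_merge_symbols get_all_next_consecutive_merge_symbols_alt
  rw [pvGoA_spec]
  cases h : symbols.findIdx? (fun s => decide (s ∉ merge_symbols)) <;> simp
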